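-- pv_equiv track=rewrite | github.com/luserli/pruning | prun_mask.py | array0
-- ===== SOURCE A (Python) =====
-- def acc0(a):
-- 	n=0
-- 	for i in a:
-- 		for j in i:
-- 			if j == 0:
-- 				n+=1
-- 	return n
--
-- def array0(a):
-- 	b=[]
-- 	if acc0(a)>1:
-- 		b.append(0)
-- 	for i in a:
-- 		for j in i:
-- 			if j != 0:
-- 				b.append(j)
-- 	return b
-- ===== SOURCE B (Python) =====
-- def array0(a):
--     res = []
--     zeros = 0
--     for row in a:
--         for x in row:
--             if x != 0:
--                 res.append(x)
--             else:
--                 zeros += 1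
--     if zeros > 1:
--         res.insert(0, 0)
--     return res
-- ===== Notes on version B (the rewrite author's own statement) =====
-- stated objective: simpler
-- what changed: Replaced A's helper-based two full traversals (acc0 zero-count pass, then a separate collect pass) with a single fused pass that collects nonzeros and counts zeros simultaneously, prepending 0 afterwards.
import Mathlib
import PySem

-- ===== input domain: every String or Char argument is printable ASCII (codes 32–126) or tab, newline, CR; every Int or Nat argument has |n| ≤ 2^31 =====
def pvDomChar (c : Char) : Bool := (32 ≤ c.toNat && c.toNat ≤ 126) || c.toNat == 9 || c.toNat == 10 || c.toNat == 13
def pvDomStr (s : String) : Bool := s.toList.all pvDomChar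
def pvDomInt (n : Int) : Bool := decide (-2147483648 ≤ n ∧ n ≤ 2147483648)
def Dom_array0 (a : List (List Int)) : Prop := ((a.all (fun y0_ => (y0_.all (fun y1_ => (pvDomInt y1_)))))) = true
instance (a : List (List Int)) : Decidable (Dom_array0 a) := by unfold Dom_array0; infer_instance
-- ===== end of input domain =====

-- B fuses A's two full traversals (zero-count pass, then collect pass) into one pass; simpler, same result.

-- ===== PORT A =====
def acc0 (a : List (List Int)) : Int :=
  a.foldl (fun n i => i.foldl (fun n j => if j == 0 then n + 1 else n) n) 0

def array0 (a : List (List Int)) : List Int :=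
  let b : List Int := if acc0 a > 1 then [0] else []
  a.foldl (fun b i => i.foldl (fun b j => if j != 0 then b ++ [j] else b) b) b

-- ===== PORT B =====
def array0_alt (a : List (List Int)) : List Int :=
  let s : List Int × Int :=
    a.foldl (fun s row =>
      row.foldl (fun s x => if x != 0 then (s.1 ++ [x], s.2) else (s.1, s.2 + 1)) s) ([], 0)
  if s.2 > 1 then 0 :: s.1 else s.1

-- ===== PRECONDITION & SPEC =====
def Spec_array0 (a : List (List Int)) (out : List Int) : Prop := out = array0_alt a
instance (a : List (List Int)) (out : List Int) : Decidable (Spec_array0 a out) := by unfold Spec_array0; infer_instance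

-- ===== CLAIM (what is proved, stated in full; the proofs are below) =====
def Claim_equal_array0 : Prop := ∀ (a : List (List Int)), Dom_array0 a → Spec_array0 a (array0 a)

-- ===== LEMMAS AND PROOFS =====

-- B's fused fold computes exactly (A's collect fold, A's count fold), componentwise.
theorem fused_inner (i : List Int) (s : List Int × Int) :
    i.foldl (fun s x => if x != 0 then (s.1 ++ [x], s.2) else (s.1, s.2 + 1)) s =
      (i.foldl (fun b j => if j != 0 then b ++ [j] else b) s.1,
       i.foldl (fun n j => if j == 0 then n + 1 else n) s.2) := by
  induction i generalizing s with
  | nil => rfl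
  | cons x t ih =>
      simp only [List.foldl_cons]
      rw [ih]
      by_cases hx : x = 0 <;> simp [hx]

theorem fused_outer (a : List (List Int)) (s : List Int × Int) :
    a.foldl (fun s row =>
        row.foldl (fun s x => if x != 0 then (s.1 ++ [x], s.2) else (s.1, s.2 + 1)) s) s =
      (a.foldl (fun b i => i.foldl (fun b j => if j != 0 then b ++ [j] else b) b) s.1,
       a.foldl (fun n i => i.foldl (fun n j => if j == 0 then n + 1 else n) n) s.2) := by
  induction a generalizing s with
  | nil => rfl
  | cons r t ih =>
      simp only [List.foldl_cons]
      rw [ih, fused_inner]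

-- A's collect fold with initial accumulator b is b ++ the fold from [].
theorem collect_inner_prefix (i : List Int) (b : List Int) :
    i.foldl (fun b j => if j != 0 then b ++ [j] else b) b =
      b ++ i.foldl (fun b j => if j != 0 then b ++ [j] else b) [] := by
  induction i generalizing b with
  | nil => simp
  | cons x t ih =>
      simp only [List.foldl_cons]
      rw [ih, ih (if (x != 0) = true then [] ++ [x] else [])]
      by_cases hx : x = 0 <;> simp [hx]

theorem collect_outer_prefix (a : List (List Int)) (b : List Int) :
    a.foldl (fun b i => i.foldl (fun b j => if j != 0 then b ++ [j] else b) b) b =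
      b ++ a.foldl (fun b i => i.foldl (fun b j => if j != 0 then b ++ [j] else b) b) [] := by
  induction a generalizing b with
  | nil => simp
  | cons r t ih =>
      simp only [List.foldl_cons]
      rw [ih, ih (r.foldl _ [])]
      rw [collect_inner_prefix r b]
      simp

-- ===== VERDICT (by name: the statement is the Claim_ definition above) =====
theorem array0_spec : Claim_equal_array0 := by
  intro a _
  unfold Spec_array0 array0 array0_alt acc0
  rw [fused_outer]
  dsimp only
  split_ifs with h
  · rw [collect_outer_prefix a [0]]
    simp
  · rfl
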